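-- pv_equiv track=rewrite | github.com/DiegoHuerta1/Blind-Source-Separation | Independence.py | get_mixed_parameters
-- ===== SOURCE A (Python) =====
-- def get_mixed_parameters(x, y, n: int) -> list[tuple]:
--     """
--     Computes tuples of length at most n with a mix of x and y
--     n >= 2
--
--     Each tuple should contain at lest one x and at least one y.
--     """
--
--     # store tuples according to their length
--     # start with the case n = 1
--     mixed_parameters_dict: dict[int, list[tuple]] = {1: [(x,), (y,)]}
--
--     # consider length of at most n
--     for p in range(2, n + 1):
--         # compute tuples of mixed parameters with length p
--         tuples_length_p: list[tuple] = []
--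
--         # for each tuple of length p-1
--         for tuples_length_p_minus_1 in mixed_parameters_dict[p - 1]:
--             # add x and y to the list
--             tuples_length_p.append(tuples_length_p_minus_1 + (x,))
--             tuples_length_p.append(tuples_length_p_minus_1 + (y,))
--
--         # the tuples of length p have been computed
--         mixed_parameters_dict[p] = tuples_length_p
--
--     # filter only the tuples that contain both variables
--     result: list[tuple] = []
--     for p, tuples_length_p in mixed_parameters_dict.items():
--         for tuple_mixed_parameters in tuples_length_p:
--             if x in tuple_mixed_parameters and y in tuple_mixed_parameters:
--                 result.append(tuple_mixed_parameters)
--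
--     return result
-- ===== SOURCE B (Python) =====
-- def get_mixed_parameters(x, y, n: int) -> list[tuple]:
--     """Direct per-length enumeration: for each length p generate all (x,y)-words
--     recursively and keep those containing both x and y; no dict, no seeded list."""
--
--     def words(p):
--         # all tuples over (x, y) of length p, first position varying slowest
--         if p == 0:
--             return [()]
--         return [(c,) + t for c in (x, y) for t in words(p - 1)]
--
--     result = []
--     for p in range(1, max(n, 1) + 1):
--         result.extend(t for t in words(p) if x in t and y in t)
--     return result
-- ===== Notes on version B (the rewrite author's own statement) =====
-- stated objective: simpler
-- what changed: Replaces the dict-of-lengths dynamic programming (seed length-1 list, extend each previous tuple by x and y, then a separate filter pass over the dict items) with a stateless per-length recursive enumeration of all (x,y)-words filtered inline.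
import Mathlib
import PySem

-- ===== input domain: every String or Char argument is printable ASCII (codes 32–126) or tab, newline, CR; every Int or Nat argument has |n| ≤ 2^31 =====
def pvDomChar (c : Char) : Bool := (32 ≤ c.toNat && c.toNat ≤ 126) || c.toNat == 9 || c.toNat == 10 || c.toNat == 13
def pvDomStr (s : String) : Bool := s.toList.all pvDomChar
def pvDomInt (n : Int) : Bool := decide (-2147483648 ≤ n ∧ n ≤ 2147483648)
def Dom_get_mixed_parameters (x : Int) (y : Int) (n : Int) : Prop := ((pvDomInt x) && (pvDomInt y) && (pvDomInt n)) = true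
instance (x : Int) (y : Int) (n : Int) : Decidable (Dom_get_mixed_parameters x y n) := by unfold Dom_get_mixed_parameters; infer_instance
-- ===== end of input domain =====

-- B replaces A's dict-of-lengths dynamic programming by a stateless per-length
-- recursive enumeration with an inline filter (simpler decomposition, same cost).

-- ===== PORT A =====
-- literal port of A; Python's d[p-1] (KeyError never reachable: key p-1 is always present)
-- is ported as getD _ [].
def get_mixed_parameters (x : Int) (y : Int) (n : Int) : List (List Int) :=
  let d0 : PySem.Dict Int (List (List Int)) := PySem.Dict.ofList [(1, [[x], [y]])]
  let d := (PySem.List.pyRange 2 (n + 1) 1).foldl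
    (fun d p =>
      let tuples_length_p :=
        (d.getD (p - 1) []).foldl (fun acc t => (acc ++ [t ++ [x]]) ++ [t ++ [y]]) []
      d.insert p tuples_length_p) d0
  d.items.foldl
    (fun res pr =>
      pr.2.foldl (fun res t => if t.contains x && t.contains y then res ++ [t] else res) res)
    []

-- ===== PORT B =====
-- all (x,y)-words of length p, first position varying slowest (Source B's `words`)
def pvWords (x : Int) (y : Int) : Nat → List (List Int)
  | 0 => [[]]
  | p + 1 => [x, y].flatMap (fun c => (pvWords x y p).map (fun t => c :: t))

def get_mixed_parameters_alt (x : Int) (y : Int) (n : Int) : List (List Int) :=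
  (PySem.List.pyRange 1 (max n 1 + 1) 1).foldl
    (fun res p =>
      res ++ (pvWords x y p.toNat).filter (fun t => t.contains x && t.contains y)) []

-- ===== PRECONDITION & SPEC =====
def Spec_get_mixed_parameters (x : Int) (y : Int) (n : Int) (out : List (List Int)) : Prop := out = get_mixed_parameters_alt x y n
instance (x : Int) (y : Int) (n : Int) (out : List (List Int)) : Decidable (Spec_get_mixed_parameters x y n out) := by unfold Spec_get_mixed_parameters; infer_instance

-- ===== CLAIM (what is proved, stated in full; the proofs are below) =====
def Claim_equal_get_mixed_parameters : Prop := ∀ (x : Int) (y : Int) (n : Int), Dom_get_mixed_parameters x y n → Spec_get_mixed_parameters x y n (get_mixed_parameters x y n)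

-- ===== LEMMAS AND PROOFS =====

-- A's inner extension loop maps a word list to all its one-step extensions.
theorem pvExtend_eq_flatMap (x y : Int) (l acc : List (List Int)) :
    l.foldl (fun acc t => (acc ++ [t ++ [x]]) ++ [t ++ [y]]) acc =
      acc ++ l.flatMap (fun t => [t ++ [x], t ++ [y]]) := by
  induction l generalizing acc with
  | nil => simp
  | cons h t ih => simp [List.append_assoc, List.flatMap_def]

-- extending every word of length p by x and by y yields the words of length p+1
theorem pvWords_succ (x y : Int) (p : Nat) :
    (pvWords x y p).flatMap (fun t => [t ++ [x], t ++ [y]]) = pvWords x y (p + 1) := by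
  induction p with
  | zero => simp [pvWords]
  | succ p ih =>
    conv_lhs => rw [pvWords]
    rw [pvWords]
    simp only [List.flatMap_cons, List.flatMap_nil, List.append_nil, List.flatMap_append,
      List.flatMap_map] at *
    have hx : ∀ c : Int, (pvWords x y p).flatMap (fun t => [(c :: t) ++ [x], (c :: t) ++ [y]]) =
        ((pvWords x y p).flatMap (fun t => [t ++ [x], t ++ [y]])).map (fun t => c :: t) := by
      intro c
      rw [List.map_flatMap]
      simp
    rw [hx, hx, ih]

-- the state of A's dict after processing lengths 2 .. k+1
theorem pvDict_items (x y : Int) (k : Nat) :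
    ((PySem.List.pyRange 2 (2 + (k : Int)) 1).foldl
      (fun d p =>
        let tuples_length_p :=
          (d.getD (p - 1) []).foldl (fun acc t => (acc ++ [t ++ [x]]) ++ [t ++ [y]]) []
        d.insert p tuples_length_p)
      (PySem.Dict.ofList [(1, [[x], [y]])])).items =
      (List.range (k + 1)).map (fun i : Nat => ((i : Int) + 1, pvWords x y (i + 1))) := by
  induction k with
  | zero =>
    rw [PySem.List.pyRange_one_eq_nil (by omega)]
    rfl
  | succ k ih =>
    have hsplit : PySem.List.pyRange 2 (2 + ((k : Int) + 1)) 1 =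
        PySem.List.pyRange 2 (2 + (k : Int)) 1 ++ [2 + (k : Int)] := by
      have := PySem.List.pyRange_one_succ_right (a := 2) (b := 2 + (k : Int)) (by omega)
      rw [← this]; ring_nf
    push_cast
    rw [hsplit, List.foldl_append]
    set step := (fun (d : PySem.Dict Int (List (List Int))) (p : Int) =>
        let tuples_length_p :=
          (d.getD (p - 1) []).foldl (fun acc t => (acc ++ [t ++ [x]]) ++ [t ++ [y]]) []
        d.insert p tuples_length_p) with hstep
    set dk := (PySem.List.pyRange 2 (2 + (k : Int)) 1).foldl step
        (PySem.Dict.ofList [(1, [[x], [y]])]) with hdk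
    have hitems : dk.items =
        (List.range (k + 1)).map (fun i : Nat => ((i : Int) + 1, pvWords x y (i + 1))) := ih
    have hkeys : dk.keys = (List.range (k + 1)).map (fun i : Nat => (i : Int) + 1) := by
      simp only [PySem.Dict.keys, hitems, List.map_map]
      rfl
    have hnodup : dk.keys.Nodup := by
      rw [hkeys]
      exact List.nodup_range.map (fun a b h => by omega)
    have hmem : ((k : Int) + 1, pvWords x y (k + 1)) ∈ dk.items := by
      rw [hitems]
      exact List.mem_map.mpr ⟨k, by simp, rfl⟩
    have hget : dk.getD (2 + (k : Int) - 1) [] = pvWords x y (k + 1) := by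
      have hkey : 2 + (k : Int) - 1 = (k : Int) + 1 := by omega
      rw [hkey]
      exact PySem.Dict.getD_of_mem_items dk hmem hnodup []
    have hc : dk.contains (2 + (k : Int)) = false := by
      rw [PySem.Dict.contains_eq_decide_mem_keys, hkeys]
      simp only [decide_eq_false_iff_not, List.mem_map, List.mem_range]
      rintro ⟨i, hi, hv⟩
      omega
    show (step dk (2 + (k : Int))).items = _
    rw [hstep]
    simp only
    rw [hget, pvExtend_eq_flatMap, List.nil_append, pvWords_succ,
      PySem.Dict.items_insert_of_not_contains _ _ hc, hitems,
      List.range_succ (n := k + 1), List.map_append]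
    simp only [List.map_cons, List.map_nil]
    have h2 : ((k + 1 : Nat) : Int) + 1 = 2 + (k : Int) := by push_cast; ring
    rw [h2]

-- flattening-with-filter of the dict items, as A's final double loop computes it
theorem pvFlatten_filter (x y : Int) (items : List (Int × List (List Int))) :
    items.foldl
      (fun res pr =>
        pr.2.foldl (fun res t => if t.contains x && t.contains y then res ++ [t] else res) res)
      [] =
      items.flatMap (fun pr => pr.2.filter (fun t => t.contains x && t.contains y)) := by
  have h := PySem.List.foldl_congr_mem
    (l := items)
    (f := fun res pr =>
      pr.2.foldl (fun res t => if t.contains x && t.contains y then res ++ [t] else res) res)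
    (g := fun res pr => res ++ pr.2.filter (fun t => t.contains x && t.contains y))
    (init := ([] : List (List Int)))
    (fun acc pr _ => PySem.List.foldl_append_if_eq_filter _ _ _)
  rw [h, PySem.List.foldl_append_eq_flatMap, List.nil_append]

-- B as a flatMap over lengths 1 .. m
theorem pvAlt_eq (x y n : Int) :
    get_mixed_parameters_alt x y n =
      (List.range (max n 1).toNat).flatMap
        (fun i : Nat => (pvWords x y (i + 1)).filter (fun t => t.contains x && t.contains y)) := by
  unfold get_mixed_parameters_alt
  rw [PySem.List.pyRange_one]
  have h1 : (max n 1 + 1 - 1) = max n 1 := by ring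
  rw [h1, List.foldl_map, PySem.List.foldl_append_eq_flatMap, List.nil_append]
  have harg : ∀ i : Nat, ((1 : Int) + (i : Int)).toNat = i + 1 := fun i => by omega
  simp only [harg]

-- the two ports agree
theorem pvMain (x y n : Int) : get_mixed_parameters x y n = get_mixed_parameters_alt x y n := by
  rw [pvAlt_eq]
  unfold get_mixed_parameters
  simp only
  rcases le_or_gt n 1 with hn | hn
  · -- n <= 1: the length loop does not run, only the seeded length-1 list remains
    rw [PySem.List.pyRange_one_eq_nil (by omega), List.foldl_nil]
    have hm : (max n 1).toNat = 1 := by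
      rcases max_choice n 1 with h | h <;> rw [h] <;> omega
    rw [hm, pvFlatten_filter]
    have hit : (PySem.Dict.ofList [((1 : Int), [[x], [y]])]).items = [((1 : Int), [[x], [y]])] := rfl
    rw [hit]
    simp [pvWords]
    rw [← List.filter_append]
    norm_num
  · -- n >= 2: write n = 2 + k
    obtain ⟨k, hk⟩ := Int.le.dest (show (2 : Int) ≤ n by omega)
    have hn1 : n + 1 = 2 + ((k + 1 : Nat) : Int) := by push_cast; omega
    rw [hn1, pvFlatten_filter, pvDict_items x y (k + 1), List.flatMap_map]
    have hm : (max n 1).toNat = k + 2 := by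
      rcases max_choice n 1 with h | h <;> rw [h] <;> omega
    rw [hm]

-- ===== VERDICT (by name: the statement is the Claim_ definition above) =====
theorem get_mixed_parameters_spec : Claim_equal_get_mixed_parameters := by
  intro x y n _
  unfold Spec_get_mixed_parameters
  exact pvMain x y n
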